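-- pv_equiv track=rewrite | github.com/uh-joan/cortellis-cli | cli_anything/cortellis/utils/output.py | _ordered_keys
-- ===== SOURCE A (Python) =====
-- _PRIORITY_KEYS = [
--     "drugId", "companyId", "dealId", "trialId", "regulationId",
--     "conferenceId", "literatureId", "pressReleaseId",
--     "id",
--     "drugName", "companyName", "dealName", "trialName", "name", "title",
--     "phase", "status", "country", "date", "startDate", "endDate",
-- ]
--
-- def _ordered_keys(records: list[dict]) -> list[str]:
--     seen: set[str] = set()
--     ordered: list[str] = []
--
--     # Priority keys first
--     for key in _PRIORITY_KEYS:
--         for record in records: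
--             if key in record and key not in seen:
--                 seen.add(key)
--                 ordered.append(key)
--                 break
--
--     # Remaining keys in insertion order from the first record
--     for key in records[0]:
--         if key not in seen:
--             seen.add(key)
--             ordered.append(key)
--
--     # Keys that only appear in later records
--     for record in records[1:]:
--         for key in record:
--             if key not in seen:
--                 seen.add(key)
--                 ordered.append(key)
--
--     return ordered
-- ===== SOURCE B (Python) =====
-- _PRIORITY_KEYS = [
--     "drugId", "companyId", "dealId", "trialId", "regulationId",
--     "conferenceId", "literatureId", "pressReleaseId",
--     "id",
--     "drugName", "companyName", "dealName", "trialName", "name", "title",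
--     "phase", "status", "country", "date", "startDate", "endDate",
-- ]
--
-- def _ordered_keys(records: list[dict]) -> list[str]:
--     # Insertion-ordered union of keys: first record's keys, then new keys from later records.
--     union = dict.fromkeys(records[0])
--     for record in records[1:]:
--         for key in record:
--             union.setdefault(key)
--     priority = [k for k in _PRIORITY_KEYS if k in union]
--     priority_set = set(priority)
--     return priority + [k for k in union if k not in priority_set]
-- ===== Notes on version B (the rewrite author's own statement) =====
-- stated objective: alternative
-- what changed: B builds the insertion-ordered union of all keys once (dict.fromkeys + setdefault) and then partitions it into priority keys and the remainder with two comprehensions, instead of A's three passes that rescan the records for each priority key.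
import Mathlib
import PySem

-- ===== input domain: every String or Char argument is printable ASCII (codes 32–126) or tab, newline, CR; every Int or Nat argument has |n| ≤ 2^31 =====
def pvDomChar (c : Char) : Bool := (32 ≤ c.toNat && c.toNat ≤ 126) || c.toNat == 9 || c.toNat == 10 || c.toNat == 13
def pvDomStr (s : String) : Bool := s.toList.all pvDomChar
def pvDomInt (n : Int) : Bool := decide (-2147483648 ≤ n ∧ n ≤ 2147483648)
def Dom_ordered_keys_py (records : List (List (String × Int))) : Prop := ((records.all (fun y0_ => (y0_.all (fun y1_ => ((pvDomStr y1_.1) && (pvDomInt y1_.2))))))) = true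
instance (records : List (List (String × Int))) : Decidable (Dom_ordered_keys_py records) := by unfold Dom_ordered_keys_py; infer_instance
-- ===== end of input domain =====

-- B builds the insertion-ordered key union once and then partitions it (priority keys, remainder),
-- replacing A's three repeated-scanning passes over the records; objective: alternative decomposition.

-- ===== PORT A =====
def pvPriorityKeys : List String := ["drugId", "companyId", "dealId", "trialId", "regulationId",
  "conferenceId", "literatureId", "pressReleaseId", "id",
  "drugName", "companyName", "dealName", "trialName", "name", "title",
  "phase", "status", "country", "date", "startDate", "endDate"]

-- inner 'for record in records: if key in record and key not in seen: …; break' loop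
-- ('key in record' on a dict is key membership: record.map Prod.fst)
def pvFindBreak (key : String) : List (List (String × Int)) → (PySem.Set String × List String) → (PySem.Set String × List String)
  | [], st => st
  | record :: rest, st =>
      if (record.map Prod.fst).contains key && !(PySem.Set.contains st.1 key) then
        (PySem.Set.add st.1 key, st.2 ++ [key])
      else pvFindBreak key rest st

-- 'if key not in seen: seen.add(key); ordered.append(key)'
def pvSeenStep (st : PySem.Set String × List String) (key : String) : PySem.Set String × List String :=
  if !(PySem.Set.contains st.1 key) then (PySem.Set.add st.1 key, st.2 ++ [key]) else st

def ordered_keys_py (records : List (List (String × Int))) : List String :=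
  let st1 := pvPriorityKeys.foldl (fun st key => pvFindBreak key records st)
      ((PySem.Set.empty : PySem.Set String), ([] : List String))
  -- records[0] raises IndexError on empty records: excluded by Pre_; the .getD [] default is never taken there
  let first := (PySem.List.pyGet? records 0).getD []
  let st2 := (first.map Prod.fst).foldl pvSeenStep st1
  let st3 := (PySem.List.slice records (some 1) none).foldl
      (fun st record => (record.map Prod.fst).foldl pvSeenStep st) st2
  st3.2

-- ===== PORT B =====
def ordered_keys_py_alt (records : List (List (String × Int))) : List String :=
  -- records[0] raises IndexError on empty records: excluded by Pre_; the .getD [] default is never taken there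
  let first := (PySem.List.pyGet? records 0).getD []
  -- the union dict holds no values (dict.fromkeys / setdefault(None)): modelled exactly by its
  -- insertion-ordered key list; setdefault appends the key iff it is new
  let union0 := PySem.List.dedup (first.map Prod.fst)
  let union := (PySem.List.slice records (some 1) none).foldl
      (fun u record => (record.map Prod.fst).foldl
        (fun u key => if u.contains key then u else u ++ [key]) u) union0
  let priority := pvPriorityKeys.filter (fun k => union.contains k)
  let pset := PySem.Set.ofList priority
  priority ++ union.filter (fun k => !(PySem.Set.contains pset k))

-- ===== PRECONDITION & SPEC =====
-- A evaluates records[0]: on empty 'records' it raises IndexError, hence excluded.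
def Pre_ordered_keys_py (records : List (List (String × Int))) : Prop := records ≠ []
instance (records : List (List (String × Int))) : Decidable (Pre_ordered_keys_py records) := by unfold Pre_ordered_keys_py; infer_instance

def pvWitness_ordered_keys_py : (List (List (String × Int))) := [[("id", 1), ("x", 2)], [("name", 3)]]

def Spec_ordered_keys_py (records : List (List (String × Int))) (out : List String) : Prop := out = ordered_keys_py_alt records
instance (records : List (List (String × Int))) (out : List String) : Decidable (Spec_ordered_keys_py records out) := by unfold Spec_ordered_keys_py; infer_instance

-- ===== CLAIM (what is proved, stated in full; the proofs are below) =====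
def Claim_equal_ordered_keys_py : Prop := ∀ (records : List (List (String × Int))), Dom_ordered_keys_py records → Pre_ordered_keys_py records → Spec_ordered_keys_py records (ordered_keys_py records)

-- ===== LEMMAS AND PROOFS =====

-- first-occurrence dedup into an accumulator: the single loop shape both programs reduce to
def pvStep (s : List String) (k : String) : List String := if s.contains k then s else s ++ [k]
def pvDedupInto (s L : List String) : List String := L.foldl pvStep s

theorem pvDedupInto_append (s L1 L2 : List String) :
    pvDedupInto s (L1 ++ L2) = pvDedupInto (pvDedupInto s L1) L2 := List.foldl_append

theorem pvDedupInto_cons (s : List String) (a : String) (L : List String) :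
    pvDedupInto s (a :: L) = pvDedupInto (pvStep s a) L := rfl

theorem pvMem_step (s : List String) (a k : String) : k ∈ pvStep s a ↔ k ∈ s ∨ k = a := by
  by_cases h : a ∈ s
  · simp only [pvStep, List.contains_eq_mem, h, decide_true, if_true]
    exact ⟨Or.inl, fun hk => hk.elim id (fun he => he ▸ h)⟩
  · simp [pvStep, List.contains_eq_mem, h]

theorem pvMem_dedupInto (L : List String) : ∀ (s : List String) (k : String),
    k ∈ pvDedupInto s L ↔ k ∈ s ∨ k ∈ L := by
  induction L with
  | nil => intro s k; simp [pvDedupInto]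
  | cons a L ih =>
    intro s k
    rw [show pvDedupInto s (a :: L) = pvDedupInto (pvStep s a) L from rfl, ih, pvMem_step]
    simp only [List.mem_cons]
    tauto

-- dedup with an initial accumulator = accumulator ++ (plain dedup, filtered by novelty)
theorem pvDedupInto_eq_filter (L : List String) : ∀ s : List String,
    pvDedupInto s L = s ++ (pvDedupInto [] L).filter (fun k => !s.contains k) := by
  induction L with
  | nil => intro s; simp [pvDedupInto]
  | cons a L ih =>
    intro s
    rw [show ∀ t, pvDedupInto t (a :: L) = pvDedupInto (pvStep t a) L from fun _ => rfl,
        show ∀ t, pvDedupInto t (a :: L) = pvDedupInto (pvStep t a) L from fun _ => rfl,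
        show pvStep [] a = [a] by simp [pvStep], ih [a], List.filter_append]
    by_cases h : a ∈ s
    · rw [show pvStep s a = s by simp [pvStep, List.contains_eq_mem, h], ih s,
         List.filter_filter]
      have h1 : List.filter (fun k => !s.contains k) [a] = [] := by
        simp [List.contains_eq_mem, h]
      have h2 : ∀ x ∈ pvDedupInto [] L,
          (!s.contains x && !(List.contains [a] x)) = (!s.contains x) := by
        intro x _
        by_cases hx : x = a
        · subst hx; simp [List.contains_eq_mem, h]
        · simp [List.contains_eq_mem, hx]
      rw [List.filter_congr h2, h1, List.nil_append]
    · rw [show pvStep s a = s ++ [a] by simp [pvStep, List.contains_eq_mem, h],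
         ih (s ++ [a]), List.filter_filter]
      have h1 : List.filter (fun k => !s.contains k) [a] = [a] := by
        simp [List.contains_eq_mem, h]
      have h2 : ∀ x ∈ pvDedupInto [] L,
          (!s.contains x && !(List.contains [a] x)) = (!(s ++ [a]).contains x) := by
        intro x _
        by_cases hx : x = a
        · subst hx; simp [List.contains_eq_mem]
        · simp [List.contains_eq_mem, hx]
      rw [List.filter_congr h2, h1, List.append_assoc]

theorem pvDedupInto_nil_of_nodup (L : List String) (h : L.Nodup) :
    pvDedupInto [] L = L := by
  induction L with
  | nil => rfl
  | cons a L ih =>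
    rw [show pvDedupInto [] (a :: L) = pvDedupInto (pvStep [] a) L from rfl,
        show pvStep [] a = [a] by simp [pvStep], pvDedupInto_eq_filter,
        ih h.of_cons]
    have : L.filter (fun k => !(List.contains [a] k)) = L := by
      apply List.filter_eq_self.mpr
      intro x hx
      have hxa : x ≠ a := fun he => (List.nodup_cons.mp h).1 (he ▸ hx)
      simp [List.contains_eq_mem, hxa]
    rw [this]
    rfl

-- the seen-set of a pair state mirrors the ordered list
def pvInv (st : PySem.Set String × List String) : Prop := ∀ k, k ∈ st.1 ↔ k ∈ st.2

theorem pvInv_grow {st : PySem.Set String × List String} (h : pvInv st) (a : String) :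
    pvInv (PySem.Set.add st.1 a, st.2 ++ [a]) := by
  intro k
  rw [PySem.Set.mem_add]
  simp only [List.mem_append, List.mem_singleton, h k]

theorem pvSeenStep_fold (L : List String) : ∀ st, pvInv st →
    (L.foldl pvSeenStep st).2 = pvDedupInto st.2 L ∧ pvInv (L.foldl pvSeenStep st) := by
  induction L with
  | nil => intro st h; exact ⟨rfl, h⟩
  | cons a L ih =>
    intro st h
    simp only [List.foldl_cons, pvSeenStep,
      show pvDedupInto st.2 (a :: L) = pvDedupInto (pvStep st.2 a) L from rfl]
    by_cases hm : a ∈ st.1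
    · have hc : PySem.Set.contains st.1 a = true := (PySem.Set.contains_iff _ _).mpr hm
      have hc2 : pvStep st.2 a = st.2 := by
        simp [pvStep, List.contains_eq_mem, (h a).mp hm]
      rw [hc]
      simpa [hc2] using ih st h
    · have hc : PySem.Set.contains st.1 a = false := by
        rw [← Bool.not_eq_true, PySem.Set.contains_iff]; exact hm
      have hm2 : a ∉ st.2 := fun hx => hm ((h a).mpr hx)
      have hc2 : pvStep st.2 a = st.2 ++ [a] := by
        simp [pvStep, List.contains_eq_mem, hm2]
      rw [hc, hc2]
      simpa using ih _ (pvInv_grow h a)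

theorem pvSeenStep_foldRecords (rs : List (List (String × Int))) : ∀ st, pvInv st →
    (rs.foldl (fun st record => (record.map Prod.fst).foldl pvSeenStep st) st).2
      = pvDedupInto st.2 (rs.flatMap (fun r => r.map Prod.fst)) ∧
    pvInv (rs.foldl (fun st record => (record.map Prod.fst).foldl pvSeenStep st) st) := by
  induction rs with
  | nil => intro st h; exact ⟨rfl, h⟩
  | cons r rs ih =>
    intro st h
    obtain ⟨h1, h2⟩ := pvSeenStep_fold (r.map Prod.fst) st h
    obtain ⟨h3, h4⟩ := ih _ h2
    refine ⟨?_, h4⟩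
    simp only [List.foldl_cons, h3, h1, List.flatMap_cons]
    exact (pvDedupInto_append _ _ _).symm

-- the break-loop adds a key iff some record contains it and it is unseen
theorem pvFindBreak_eq (key : String) (recs : List (List (String × Int))) : ∀ st,
    pvFindBreak key recs st =
      if recs.any (fun r => (r.map Prod.fst).contains key) && !(PySem.Set.contains st.1 key) then
        (PySem.Set.add st.1 key, st.2 ++ [key])
      else st := by
  induction recs with
  | nil => intro st; simp [pvFindBreak]
  | cons r recs ih =>
    intro st
    rw [show pvFindBreak key (r :: recs) st =
        (if ((r.map Prod.fst).contains key && !(PySem.Set.contains st.1 key)) = true then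
          (PySem.Set.add st.1 key, st.2 ++ [key])
        else pvFindBreak key recs st) from rfl, ih st, List.any_cons]
    cases hb : (r.map Prod.fst).contains key <;>
      cases hsb : PySem.Set.contains st.1 key <;>
      simp [hb, hsb] <;>
      rw [Bool.false_or]

-- the priority pass appends, dedup-style, each priority key present in some record
theorem pvPriorityFold (records : List (List (String × Int))) (pks : List String) : ∀ st, pvInv st →
    (pks.foldl (fun st key => pvFindBreak key records st) st).2
      = pvDedupInto st.2 (pks.filter (fun k => records.any (fun r => (r.map Prod.fst).contains k))) ∧
    pvInv (pks.foldl (fun st key => pvFindBreak key records st) st) := by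
  induction pks with
  | nil => intro st h; exact ⟨rfl, h⟩
  | cons a pks ih =>
    intro st h
    simp only [List.foldl_cons, List.filter_cons]
    rw [pvFindBreak_eq a records st]
    cases ha : (records.any fun r => (List.map Prod.fst r).contains a) with
    | true =>
      by_cases hm : a ∈ st.1
      · have hc : PySem.Set.contains st.1 a = true := (PySem.Set.contains_iff _ _).mpr hm
        have h2 : pvStep st.2 a = st.2 := by
          simp [pvStep, List.contains_eq_mem, (h a).mp hm]
        rw [if_neg (by rw [hc]; simp), if_pos rfl, pvDedupInto_cons, h2]
        exact ih st h
      · have hc : PySem.Set.contains st.1 a = false :=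
          Bool.eq_false_iff.mpr (fun hx => hm ((PySem.Set.contains_iff _ _).mp hx))
        have hm2 : a ∉ st.2 := fun hx => hm ((h a).mpr hx)
        have h2 : pvStep st.2 a = st.2 ++ [a] := by
          simp [pvStep, List.contains_eq_mem, hm2]
        rw [if_pos (by rw [hc]; rfl), if_pos rfl, pvDedupInto_cons, h2]
        exact ih _ (pvInv_grow h a)
    | false =>
      rw [if_neg (by simp), if_neg (by simp)]
      exact ih st h

-- B's nested union loop is the same dedup fold over the concatenated key lists
theorem pvUnionFold (rs : List (List (String × Int))) : ∀ u : List String,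
    rs.foldl (fun u record => (record.map Prod.fst).foldl
        (fun u key => if u.contains key then u else u ++ [key]) u) u
      = pvDedupInto u (rs.flatMap (fun r => r.map Prod.fst)) := by
  induction rs with
  | nil => intro u; rfl
  | cons r rs ih =>
    intro u
    simp only [List.foldl_cons, List.flatMap_cons, pvDedupInto_append]
    exact ih _

theorem pvPriorityKeys_nodup : pvPriorityKeys.Nodup := by decide

theorem pvDedup_eq (xs : List String) : PySem.List.dedup xs = pvDedupInto [] xs := rfl

-- A reduced to the dedup fold: priority pass, then all keys in record order
theorem pvA_eq (r : List (String × Int)) (rs : List (List (String × Int))) :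
    ordered_keys_py (r :: rs) =
      pvDedupInto
        (pvPriorityKeys.filter (fun k => (r :: rs).any (fun rec => (rec.map Prod.fst).contains k)))
        ((r.map Prod.fst) ++ rs.flatMap (fun rec => rec.map Prod.fst)) := by
  have hinv0 : pvInv ((PySem.Set.empty : PySem.Set String), ([] : List String)) := by
    intro k
    simp
  obtain ⟨h1, h2⟩ := pvPriorityFold (r :: rs) pvPriorityKeys _ hinv0
  obtain ⟨h3, h4⟩ := pvSeenStep_fold (r.map Prod.fst) _ h2
  obtain ⟨h5, _⟩ := pvSeenStep_foldRecords rs _ h4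
  simp only [ordered_keys_py]
  rw [show PySem.List.pyGet? (r :: rs) (0 : Int) = some r by simp [pysem],
      PySem.List.slice_from_one, List.tail_cons, Option.getD_some]
  rw [h5, h3, h1, ← pvDedupInto_append,
      pvDedupInto_nil_of_nodup _ (pvPriorityKeys_nodup.filter _)]

-- B reduced to the same priority list and dedup fold
theorem pvB_eq (r : List (String × Int)) (rs : List (List (String × Int))) :
    ordered_keys_py_alt (r :: rs) =
      (pvPriorityKeys.filter (fun k => (r :: rs).any (fun rec => (rec.map Prod.fst).contains k))) ++
      (pvDedupInto [] ((r.map Prod.fst) ++ rs.flatMap (fun rec => rec.map Prod.fst))).filter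
        (fun k => !(List.contains
          (pvPriorityKeys.filter (fun k => (r :: rs).any (fun rec => (rec.map Prod.fst).contains k))) k)) := by
  simp only [ordered_keys_py_alt]
  rw [show PySem.List.pyGet? (r :: rs) (0 : Int) = some r by simp [pysem],
      PySem.List.slice_from_one, List.tail_cons, Option.getD_some,
      pvDedup_eq, pvUnionFold, ← pvDedupInto_append]
  have hP : (pvPriorityKeys.filter
        (fun k => List.contains (pvDedupInto [] ((r.map Prod.fst) ++ rs.flatMap (fun rec => rec.map Prod.fst))) k))
      = pvPriorityKeys.filter (fun k => (r :: rs).any (fun rec => (rec.map Prod.fst).contains k)) := by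
    refine List.filter_congr ?_
    intro k _
    rw [Bool.eq_iff_iff]
    simp only [List.contains_eq_mem, decide_eq_true_eq, pvMem_dedupInto, List.mem_append,
      List.mem_flatMap, List.any_eq_true, List.mem_cons, List.not_mem_nil, false_or]
    constructor
    · rintro (hk | ⟨rec, hrec, hk⟩)
      · exact ⟨r, Or.inl rfl, by simpa using hk⟩
      · exact ⟨rec, Or.inr hrec, by simpa using hk⟩
    · rintro ⟨rec, hrec | hrec, hk⟩
      · exact Or.inl (by simpa [hrec] using hk)
      · exact Or.inr ⟨rec, hrec, by simpa using hk⟩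
  rw [hP]
  congr 1
  refine List.filter_congr ?_
  intro k _
  simp [PySem.Set.contains_eq_listContains, List.contains_eq_mem, PySem.Set.mem_ofList]

-- ===== VERDICT (by name: the statement is the Claim_ definition above) =====
theorem ordered_keys_py_spec : Claim_equal_ordered_keys_py := by
  intro records _hdom hpre
  obtain ⟨r, rs, rfl⟩ : ∃ r rs, records = r :: rs := by
    cases records with
    | nil => exact absurd rfl hpre
    | cons r rs => exact ⟨r, rs, rfl⟩
  unfold Spec_ordered_keys_py
  rw [pvA_eq, pvB_eq, pvDedupInto_eq_filter]
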